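-- pv_equiv track=rewrite | github.com/BlueJacket98/CodeSignal | duplicatePairsOnSegment.py | duplicatePairsOnSegment
-- ===== SOURCE A (Python) =====
-- def duplicatePairsOnSegment(numbers, k):
--     n = len(numbers)
--     i, j = 0, 0
--     cnt = 0
--     hashMap = {numbers[0]: 1}
--     while i < n:
--         while not isValidSubarray(hashMap, k):
--             i += 1
--             if i >= n:
--                 return cnt
--             if hashMap.get(numbers[i]) == None:
--                 hashMap[numbers[i]] = 1
--             else:
--                 hashMap[numbers[i]] += 1
--         if isValidSubarray(hashMap, k):
--             cnt += n - i
--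
--         j += 1
--         hashMap[numbers[j-1]] -= 1
--     return cnt
--
-- def isValidSubarray(hashMap: dict, k: int):
--     cnt = 0
--     for key, value in hashMap.items():
--         if value >= 2:
--             cnt += value // 2
--             if cnt >= k:
--                 return True
--     return False
-- ===== SOURCE B (Python) =====
-- def duplicatePairsOnSegment(numbers, k):
--     # A subarray counts when it has at least k duplicate pairs; a subarray with
--     # no duplicate pair never counts, so the effective threshold is max(k, 1).
--     # For each right end, grow the window; shrink from the left while the window
--     # still meets the threshold, maintaining the pair count incrementally; every
--     # left end strictly before `left` gives a valid subarray ending at `right`.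
--     need = max(k, 1)
--     count = {}
--     pairs = 0
--     left = 0
--     total = 0
--     for x in numbers:
--         c = count.get(x, 0) + 1
--         count[x] = c
--         if c % 2 == 0:
--             pairs += 1
--         while pairs >= need:
--             y = numbers[left]
--             cy = count[y]
--             count[y] = cy - 1
--             if cy % 2 == 0:
--                 pairs -= 1
--             left += 1
--         total += left
--     return total
-- ===== Notes on version B (the rewrite author's own statement) =====
-- stated objective: faster
-- what changed: A fixes the left end and rescans the whole hash map of counts to re-test validity at every pointer move; B runs the two pointers the other way round (for each right end it counts the valid left ends) and maintains the number of duplicate pairs incrementally, making each validity test O(1).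
import Mathlib
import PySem

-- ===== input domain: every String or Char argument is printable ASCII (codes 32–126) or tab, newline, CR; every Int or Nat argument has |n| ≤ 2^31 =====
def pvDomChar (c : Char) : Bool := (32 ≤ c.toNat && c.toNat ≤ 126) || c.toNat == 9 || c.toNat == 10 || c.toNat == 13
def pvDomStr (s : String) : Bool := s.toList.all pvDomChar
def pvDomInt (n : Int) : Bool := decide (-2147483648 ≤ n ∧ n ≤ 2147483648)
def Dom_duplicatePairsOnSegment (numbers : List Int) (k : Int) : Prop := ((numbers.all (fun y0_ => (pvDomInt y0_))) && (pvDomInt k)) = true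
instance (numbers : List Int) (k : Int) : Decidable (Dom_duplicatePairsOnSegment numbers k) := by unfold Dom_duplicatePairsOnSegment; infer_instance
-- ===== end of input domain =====

-- B replaces A's per-step rescan of the whole hash map by an incrementally maintained
-- pair count with the opposite two-pointer orientation (for each right end, count the
-- valid left ends); objective: faster.

-- ===== PORT A =====
-- isValidSubarray: scan hashMap.items(), cnt += value // 2 for value >= 2, early True
def pvIsValidGo (k : Int) : List (Int × Int) → Int → Bool
  | [], _ => false
  | (_, v) :: rest, cnt =>
    if 2 ≤ v then
      let cnt' := cnt + PySem.Int.floordiv v 2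
      if k ≤ cnt' then true else pvIsValidGo k rest cnt'
    else pvIsValidGo k rest cnt

def pvIsValid (h : PySem.Dict Int Int) (k : Int) : Bool := pvIsValidGo k h.items 0

-- the inner `while not isValidSubarray(...)` loop: advances i, adding numbers[i];
-- returns none when it falls off the right end (Python: `return cnt`)
def pvAInner (numbers : List Int) (k : Int) :
    Nat → Nat → PySem.Dict Int Int → Option (Nat × PySem.Dict Int Int)
  | 0, _, _ => none  -- fuel guard; the initial fuel numbers.length - i is never exhausted
  | fuel + 1, i, h =>
    if pvIsValid h k then some (i, h)
    else if numbers.length ≤ i + 1 then none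
    else
      -- numbers[i+1]: the recursion keeps i+1 < len, so the Python index never raises
      let x := numbers.getD (i + 1) 0
      let h' := if (h.get? x).isNone then h.insert x 1 else h.modify x 0 (· + 1)
      pvAInner numbers k fuel (i + 1) h'

-- the outer `while i < n` loop; fuel only makes the recursion on j structural:
-- the initial fuel n+1 is never exhausted (j ≤ n throughout, proved below)
def pvAOuter (numbers : List Int) (k : Int) :
    Nat → Nat → Nat → Int → PySem.Dict Int Int → Int
  | 0, _, _, cnt, _ => cnt
  | fuel + 1, i, j, cnt, h =>
    if i < numbers.length then
      match pvAInner numbers k (numbers.length - i) i h with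
      | none => cnt
      | some (i', h') =>
        let cnt' := if pvIsValid h' k then cnt + ((numbers.length : Int) - (i' : Int)) else cnt
        -- hashMap[numbers[j]] -= 1  (key always present on admitted runs)
        pvAOuter numbers k fuel i' (j + 1) cnt' (h'.modify (numbers.getD j 0) 0 (· - 1))
    else cnt

def duplicatePairsOnSegment (numbers : List Int) (k : Int) : Int :=
  match numbers with
  | [] => 0  -- Python raises IndexError at numbers[0]; excluded by Pre_
  | x :: _ => pvAOuter numbers k (numbers.length + 1) 0 0 0 (PySem.Dict.ofList [(x, 1)])

-- ===== PORT B =====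
-- the `while pairs >= need` shrink loop (need = max k 1 ≥ 1, so it stops on an empty window)
def pvBShrink (numbers : List Int) (need : Int) (r : Nat) :
    Nat → Nat → PySem.Dict Int Int → Int → Nat × PySem.Dict Int Int × Int
  | 0, left, d, pairs => (left, d, pairs)  -- fuel guard; initial fuel r + 1 - left suffices
  | fuel + 1, left, d, pairs =>
    if need ≤ pairs then
      let y := numbers.getD left 0      -- numbers[left], left ≤ r < len on every call made
      let cy := d.getD y 0              -- count[y]; the key is always present here
      let d' := d.insert y (cy - 1)
      let pairs' := if PySem.Int.mod cy 2 == 0 then pairs - 1 else pairs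
      pvBShrink numbers need r fuel (left + 1) d' pairs'
    else (left, d, pairs)

-- the `for right, x in enumerate(numbers)` loop, r the running index
def pvBGo (numbers : List Int) (need : Int) :
    List Int → Nat → Nat → PySem.Dict Int Int → Int → Int → Int
  | [], _, _, _, _, total => total
  | x :: rest, r, left, d, pairs, total =>
    let c := d.getD x 0 + 1
    let d' := d.insert x c
    let pairs' := if PySem.Int.mod c 2 == 0 then pairs + 1 else pairs
    let s := pvBShrink numbers need r (r + 1 - left) left d' pairs'
    pvBGo numbers need rest (r + 1) s.1 s.2.1 s.2.2 (total + (s.1 : Int))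

def duplicatePairsOnSegment_alt (numbers : List Int) (k : Int) : Int :=
  pvBGo numbers (max k 1) numbers 0 0 PySem.Dict.empty 0 0

-- ===== PRECONDITION & SPEC =====
-- Pre_ excludes only the empty list, on which A raises IndexError at numbers[0]
def Pre_duplicatePairsOnSegment (numbers : List Int) (k : Int) : Prop := numbers ≠ []
instance (numbers : List Int) (k : Int) : Decidable (Pre_duplicatePairsOnSegment numbers k) := by
  unfold Pre_duplicatePairsOnSegment; infer_instance

def pvWitness_duplicatePairsOnSegment : List Int × Int := ([1, 2, 1, 1], 1)

def Spec_duplicatePairsOnSegment (numbers : List Int) (k : Int) (out : Int) : Prop :=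
  out = duplicatePairsOnSegment_alt numbers k
instance (numbers : List Int) (k : Int) (out : Int) : Decidable (Spec_duplicatePairsOnSegment numbers k out) := by
  unfold Spec_duplicatePairsOnSegment; infer_instance

-- ===== CLAIM (what is proved, stated in full; the proofs are below) =====
def Claim_equal_duplicatePairsOnSegment : Prop :=
  ∀ (numbers : List Int) (k : Int), Dom_duplicatePairsOnSegment numbers k →
    Pre_duplicatePairsOnSegment numbers k →
    Spec_duplicatePairsOnSegment numbers k (duplicatePairsOnSegment numbers k)

-- ===== LEMMAS AND PROOFS =====

-- the window numbers[j..i] (both ends inclusive)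
def pvWin (numbers : List Int) (j i : Nat) : List Int := (numbers.drop j).take (i + 1 - j)

-- number of duplicate pairs in a list, incrementally: adding x to l adds a pair iff
-- the new multiplicity of x is even
def pvPairs : List Int → Nat
  | [] => 0
  | x :: l => pvPairs l + (if (l.count x + 1) % 2 = 0 then 1 else 0)

def pvPairsF (l : List Int) : Nat := ∑ x ∈ l.toFinset, l.count x / 2

theorem pvPairs_eq_pairsF (l : List Int) : pvPairs l = pvPairsF l := by
  induction l with
  | nil => simp [pvPairs, pvPairsF]
  | cons x l ih =>
    rw [pvPairs, ih]
    unfold pvPairsF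
    rw [List.toFinset_cons]
    by_cases hx : x ∈ l
    · have hxf : x ∈ l.toFinset := List.mem_toFinset.mpr hx
      rw [Finset.insert_eq_self.mpr hxf]
      rw [← Finset.add_sum_erase _ _ hxf, ← Finset.add_sum_erase _ _ hxf]
      have hcongr : ∑ y ∈ l.toFinset.erase x, (x :: l).count y / 2
          = ∑ y ∈ l.toFinset.erase x, l.count y / 2 := by
        refine Finset.sum_congr rfl (fun y hy => ?_)
        have hyx : y ≠ x := (Finset.mem_erase.mp hy).1
        simp [List.count_cons, Ne.symm hyx]
      rw [hcongr, List.count_cons_self]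
      have : (l.count x + 1) / 2 = l.count x / 2 + (if (l.count x + 1) % 2 = 0 then 1 else 0) := by
        split <;> omega
      omega
    · have hxf : x ∉ l.toFinset := fun hmem => hx (List.mem_toFinset.mp hmem)
      rw [Finset.sum_insert hxf]
      have hcnt : l.count x = 0 := List.count_eq_zero.mpr hx
      have hcongr : ∑ y ∈ l.toFinset, (x :: l).count y / 2
          = ∑ y ∈ l.toFinset, l.count y / 2 := by
        refine Finset.sum_congr rfl (fun y hy => ?_)
        have hyx : y ≠ x := fun h => hx (h ▸ List.mem_toFinset.mp hy)
        simp [List.count_cons, Ne.symm hyx]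
      rw [hcongr, List.count_cons_self, hcnt]
      simp

theorem pvPairs_perm {l l' : List Int} (h : l.Perm l') : pvPairs l = pvPairs l' := by
  rw [pvPairs_eq_pairsF, pvPairs_eq_pairsF]
  unfold pvPairsF
  rw [List.toFinset_eq_of_perm _ _ h]
  exact Finset.sum_congr rfl (fun y _ => by rw [h.count_eq])

theorem pvPairs_snoc (l : List Int) (x : Int) : pvPairs (l ++ [x]) = pvPairs (x :: l) := by
  exact pvPairs_perm (List.perm_append_singleton x l)

-- valid window predicate (m ≤ the number of duplicate pairs in numbers[j..i])
abbrev pvValid (numbers : List Int) (m : Int) (j i : Nat) : Prop :=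
  m ≤ (pvPairs (pvWin numbers j i) : Int)

-- window structure
theorem pvWin_empty (numbers : List Int) {j i : Nat} (h : i < j) : pvWin numbers j i = [] := by
  unfold pvWin; have : i + 1 - j = 0 := by omega
  simp [this]

theorem pvWin_cons (numbers : List Int) {j i : Nat} (hji : j ≤ i) (hj : j < numbers.length) :
    pvWin numbers j i = numbers.getD j 0 :: pvWin numbers (j + 1) i := by
  unfold pvWin
  rw [List.drop_eq_getElem_cons hj, List.getD_eq_getElem numbers 0 hj]
  have h1 : i + 1 - j = (i - j) + 1 := by omega
  have h2 : i + 1 - (j + 1) = i - j := by omega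
  rw [h1, h2, List.take_succ_cons]

theorem pvWin_snoc (numbers : List Int) {j i : Nat} (hji : j ≤ i + 1) (hi : i + 1 < numbers.length) :
    pvWin numbers j (i + 1) = pvWin numbers j i ++ [numbers.getD (i + 1) 0] := by
  unfold pvWin
  have h1 : i + 1 + 1 - j = (i + 1 - j) + 1 := by omega
  rw [h1, List.take_succ]
  congr 1
  have h2 : (numbers.drop j)[i + 1 - j]? = numbers[j + (i + 1 - j)]? := by
    rw [List.getElem?_drop]
  have h3 : j + (i + 1 - j) = i + 1 := by omega
  rw [h2, h3, List.getElem?_eq_getElem hi, List.getD_eq_getElem numbers 0 hi]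
  simp

-- monotonicity
theorem pvPairs_le_cons (x : Int) (l : List Int) : pvPairs l ≤ pvPairs (x :: l) := by
  simp [pvPairs]

theorem pvPairs_win_le_succ (numbers : List Int) {j i : Nat} (hi : i + 1 < numbers.length) :
    pvPairs (pvWin numbers j i) ≤ pvPairs (pvWin numbers j (i + 1)) := by
  by_cases hji : j ≤ i + 1
  · rw [pvWin_snoc numbers hji hi, pvPairs_snoc]
    exact pvPairs_le_cons _ _
  · rw [pvWin_empty numbers (by omega : i < j), pvWin_empty numbers (by omega : i + 1 < j)]

theorem pvValid_mono_i (numbers : List Int) (m : Int) {j i i' : Nat}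
    (h : pvValid numbers m j i) (hii : i ≤ i') (hi' : i' < numbers.length) :
    pvValid numbers m j i' := by
  induction i', hii using Nat.le_induction with
  | base => exact h
  | succ t ht ih =>
    have hvt := ih (by omega)
    unfold pvValid at hvt ⊢
    have := pvPairs_win_le_succ numbers (j := j) (i := t) (by omega)
    omega

theorem pvValid_anti_j (numbers : List Int) (m : Int) {j i : Nat}
    (h : pvValid numbers m (j + 1) i) (hm : 1 ≤ m) : pvValid numbers m j i := by
  unfold pvValid at h ⊢
  by_cases hji : j ≤ i
  · by_cases hj : j < numbers.length
    · rw [pvWin_cons numbers hji hj]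
      have := pvPairs_le_cons (numbers.getD j 0) (pvWin numbers (j + 1) i)
      omega
    · have h1 : pvWin numbers (j + 1) i = [] := by
        unfold pvWin
        rw [List.drop_eq_nil_of_le (by omega)]
        simp
      rw [h1] at h
      simp [pvPairs] at h
      omega
  · rw [pvWin_empty numbers (by omega : i < j + 1)] at h
    simp [pvPairs] at h
    omega

theorem pvValid_nonempty (numbers : List Int) {m : Int} {j i : Nat}
    (h : pvValid numbers m j i) (hm : 1 ≤ m) : j ≤ i := by
  by_contra hji
  unfold pvValid at h
  rw [pvWin_empty numbers (by omega : i < j)] at h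
  simp [pvPairs] at h
  omega

-- dict/window invariant
def pvHInv (h : PySem.Dict Int Int) (w : List Int) : Prop :=
  (∀ x : Int, h.getD x 0 = (w.count x : Int)) ∧ (∀ x ∈ w, x ∈ h.keys) ∧ h.keys.Nodup

-- proof-side: the total contribution of an items list to isValidSubarray's cnt
def pvS (items : List (Int × Int)) : Int :=
  (items.map (fun p => if 2 ≤ p.2 then PySem.Int.floordiv p.2 2 else 0)).sum

theorem pvFloordiv_two_ge_one {v : Int} (hv : 2 ≤ v) : 1 ≤ PySem.Int.floordiv v 2 := by
  rw [PySem.Int.floordiv_eq_ediv_of_pos (by omega)]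
  omega

theorem pvS_nonneg (items : List (Int × Int)) : 0 ≤ pvS items := by
  induction items with
  | nil => simp [pvS]
  | cons p rest ih =>
    unfold pvS at ih ⊢
    rw [List.map_cons, List.sum_cons]
    have : (0 : Int) ≤ (if 2 ≤ p.2 then PySem.Int.floordiv p.2 2 else 0) := by
      split
      · have := pvFloordiv_two_ge_one (by assumption)
        omega
      · omega
    omega

theorem pvIsValidGo_eq (k : Int) (items : List (Int × Int)) (cnt : Int) :
    pvIsValidGo k items cnt = decide (1 ≤ pvS items ∧ k ≤ cnt + pvS items) := by
  induction items generalizing cnt with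
  | nil => simp [pvIsValidGo, pvS]
  | cons p rest ih =>
    obtain ⟨x, v⟩ := p
    rw [pvIsValidGo]
    have hS : pvS ((x, v) :: rest) = (if 2 ≤ v then PySem.Int.floordiv v 2 else 0) + pvS rest := by
      simp [pvS]
    have hSr := pvS_nonneg rest
    by_cases hv : 2 ≤ v
    · have hfd := pvFloordiv_two_ge_one hv
      simp only [hv, if_pos]
      by_cases hk : k ≤ cnt + PySem.Int.floordiv v 2
      · rw [if_pos hk, hS, if_pos hv]
        have : (1 ≤ PySem.Int.floordiv v 2 + pvS rest ∧
            k ≤ cnt + (PySem.Int.floordiv v 2 + pvS rest)) := ⟨by omega, by omega⟩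
        exact (decide_eq_true this).symm
      · rw [if_neg hk, ih, hS, if_pos hv]
        rw [decide_eq_decide]
        constructor
        · rintro ⟨h1, h2⟩
          exact ⟨by omega, by omega⟩
        · rintro ⟨h1, h2⟩
          exact ⟨by omega, by omega⟩
    · simp only [hv, if_neg, ite_false]
      rw [ih, hS, if_neg hv]
      rw [decide_eq_decide]
      constructor
      · rintro ⟨h1, h2⟩; exact ⟨by omega, by omega⟩
      · rintro ⟨h1, h2⟩; exact ⟨by omega, by omega⟩

theorem pvIsValid_eq (h : PySem.Dict Int Int) (w : List Int) (k : Int) (hin : pvHInv h w) :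
    pvIsValid h k = decide ((max k 1 : Int) ≤ (pvPairs w : Int)) := by
  obtain ⟨hval, hmem, hnd⟩ := hin
  have hitems : h.items = h.keys.map (fun key => (key, h.getD key 0)) :=
    PySem.Dict.items_eq_map_keys h hnd 0
  have hterm : ∀ x : Int, (if 2 ≤ h.getD x 0 then PySem.Int.floordiv (h.getD x 0) 2 else 0)
      = ((w.count x / 2 : Nat) : Int) := by
    intro x
    rw [hval x]
    by_cases hc : 2 ≤ (w.count x : Int)
    · rw [if_pos hc]
      exact_mod_cast PySem.Int.floordiv_natCast (w.count x) 2
    · rw [if_neg hc]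
      have : w.count x / 2 = 0 := by omega
      rw [this]
      simp
  have hSval : pvS h.items = ((pvPairs w : Nat) : Int) := by
    unfold pvS
    rw [hitems, List.map_map]
    have : ((fun p : Int × Int => if 2 ≤ p.2 then PySem.Int.floordiv p.2 2 else 0) ∘
        (fun key => (key, h.getD key 0))) = fun x : Int => ((w.count x / 2 : Nat) : Int) := by
      funext x
      exact hterm x
    rw [this]
    have hcast : (h.keys.map (fun x : Int => ((w.count x / 2 : Nat) : Int))).sum
        = (((h.keys.map (fun x : Int => w.count x / 2)).sum : Nat) : Int) := by
      rw [show (fun x : Int => ((w.count x / 2 : Nat) : Int))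
          = (fun n : Nat => (n : Int)) ∘ (fun x : Int => w.count x / 2) from rfl,
        ← List.map_map, Nat.cast_list_sum]
    rw [hcast]
    congr 1
    rw [← List.sum_toFinset _ hnd]
    rw [pvPairs_eq_pairsF]
    unfold pvPairsF
    rw [Finset.sum_subset (fun x hx => List.mem_toFinset.mpr (hmem x (List.mem_toFinset.mp hx)))]
    intro x _ hxw
    have : x ∉ w := fun hc => hxw (List.mem_toFinset.mpr hc)
    rw [List.count_eq_zero.mpr this]
    rfl
  unfold pvIsValid
  rw [pvIsValidGo_eq, hSval, decide_eq_decide]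
  omega

-- counting targets
def pvC (numbers : List Int) (m : Int) (j : Nat) : Nat :=
  ((Finset.range numbers.length).filter (fun i => pvValid numbers m j i)).card

def pvGcnt (numbers : List Int) (k : Int) (i : Nat) : Nat :=
  ((Finset.range numbers.length).filter (fun j => j ≤ i ∧ pvValid numbers k j i)).card

-- validity descends to smaller left ends (bigger windows)
theorem pvValid_le_j (numbers : List Int) {m : Int} (hm : 1 ≤ m) {j j' i : Nat}
    (hjj : j ≤ j') (h : pvValid numbers m j' i) : pvValid numbers m j i := by
  revert h
  induction j', hjj using Nat.le_induction with
  | base => exact fun h => h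
  | succ t ht ih => exact fun h => ih (pvValid_anti_j numbers m h hm)

theorem pvAInner_spec (numbers : List Int) (k : Int) (j : Nat) :
    ∀ (fuel i : Nat) (h : PySem.Dict Int Int),
      numbers.length - i ≤ fuel → i < numbers.length → j ≤ i + 1 →
      pvHInv h (pvWin numbers j i) →
      (∀ i'' < i, ¬ pvValid numbers (max k 1) j i'') →
      (match pvAInner numbers k fuel i h with
       | none => ∀ i'' < numbers.length, ¬ pvValid numbers (max k 1) j i''
       | some (i', h') => i ≤ i' ∧ i' < numbers.length ∧ j ≤ i' + 1 ∧
           pvHInv h' (pvWin numbers j i') ∧ pvValid numbers (max k 1) j i' ∧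
           (∀ i'' < i', ¬ pvValid numbers (max k 1) j i'')) := by
  intro fuel
  induction fuel with
  | zero =>
    intro i h hfuel hi hji hinv hIII
    exact absurd hfuel (by omega)
  | succ fuel ih =>
    intro i h hfuel hi hji hinv hIII
    rw [pvAInner]
    have hiv : pvIsValid h k = decide (pvValid numbers (max k 1) j i) :=
      pvIsValid_eq h (pvWin numbers j i) k hinv
    by_cases hv : pvValid numbers (max k 1) j i
    · rw [hiv, decide_eq_true hv, if_pos rfl]
      exact ⟨le_refl _, hi, hji, hinv, hv, hIII⟩
    · rw [hiv, decide_eq_false hv]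
      rw [if_neg Bool.false_ne_true]
      by_cases hlen : numbers.length ≤ i + 1
      · rw [if_pos hlen]
        intro i'' hi''
        by_cases hc : i'' < i
        · exact hIII i'' hc
        · have : i'' = i := by omega
          subst this
          exact hv
      · rw [if_neg hlen]
        obtain ⟨hval, hmem, hnd⟩ := hinv
        have hin1 : i + 1 < numbers.length := by omega
        have hwin : pvWin numbers j (i + 1) = pvWin numbers j i ++ [(numbers.getD (i + 1) 0)] :=
          pvWin_snoc numbers hji hin1
        have hcnt : ∀ z : Int, (pvWin numbers j (i + 1)).count z
            = (pvWin numbers j i).count z + (if z = (numbers.getD (i + 1) 0) then 1 else 0) := by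
          intro z
          rw [hwin, List.count_append]
          by_cases hzx : z = (numbers.getD (i + 1) 0)
          · simp [hzx]
          · have h1 : ¬ (numbers.getD (i + 1) 0) = z := fun hh => hzx hh.symm
            simp only [List.count_cons, List.count_nil, beq_iff_eq, if_neg h1, if_neg hzx]
        have hinv' : pvHInv (if (h.get? (numbers.getD (i + 1) 0)).isNone then h.insert (numbers.getD (i + 1) 0) 1 else h.modify (numbers.getD (i + 1) 0) 0 (· + 1))
            (pvWin numbers j (i + 1)) := by
          by_cases hg : (h.get? (numbers.getD (i + 1) 0)).isNone
          · rw [if_pos hg]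
            have hx0 : h.getD (numbers.getD (i + 1) 0) 0 = 0 := by
              rw [PySem.Dict.getD_eq_get?_getD]
              cases hcase : h.get? (numbers.getD (i + 1) 0) with
              | none => rfl
              | some v => rw [hcase] at hg; simp at hg
            refine ⟨?_, ?_, PySem.Dict.nodup_keys_insert h _ _ hnd⟩
            · intro z
              rw [PySem.Dict.getD_insert, hcnt z]
              by_cases hzx : z = (numbers.getD (i + 1) 0)
              · rw [if_pos hzx, hzx]
                have : ((pvWin numbers j i).count (numbers.getD (i + 1) 0) : Int) = 0 := by rw [← hval (numbers.getD (i + 1) 0), hx0]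
                have hc0 : (pvWin numbers j i).count (numbers.getD (i + 1) 0) = 0 := by exact_mod_cast this
                rw [hc0]
                simp
              · rw [if_neg hzx, hval z, if_neg hzx]
                simp
            · intro z hz
              rw [hwin] at hz
              rcases List.mem_append.mp hz with hz1 | hz2
              · exact (PySem.Dict.mem_keys_insert _ _ _ _).mpr (Or.inr (hmem z hz1))
              · have : z = (numbers.getD (i + 1) 0) := by simpa using hz2
                exact (PySem.Dict.mem_keys_insert _ _ _ _).mpr (Or.inl this)
          · rw [if_neg hg]
            refine ⟨?_, ?_, ?_⟩
            · intro z
              rw [PySem.Dict.getD_modify, hcnt z]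
              by_cases hzx : z = (numbers.getD (i + 1) 0)
              · rw [if_pos hzx, hzx, hval (numbers.getD (i + 1) 0)]
                simp
              · rw [if_neg hzx, hval z, if_neg hzx]
                simp
            · intro z hz
              rw [hwin] at hz
              have hk : (h.modify (numbers.getD (i + 1) 0) 0 (· + 1)).keys = (h.insert (numbers.getD (i + 1) 0) (h.getD (numbers.getD (i + 1) 0) 0 + 1)).keys :=
                PySem.Dict.keys_modify h (numbers.getD (i + 1) 0) 0 (· + 1)
              rw [hk]
              rcases List.mem_append.mp hz with hz1 | hz2
              · exact (PySem.Dict.mem_keys_insert _ _ _ _).mpr (Or.inr (hmem z hz1))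
              · have : z = (numbers.getD (i + 1) 0) := by simpa using hz2
                exact (PySem.Dict.mem_keys_insert _ _ _ _).mpr (Or.inl this)
            · rw [PySem.Dict.keys_modify h (numbers.getD (i + 1) 0) 0 (· + 1)]
              exact PySem.Dict.nodup_keys_insert h _ _ hnd
        have hIII' : ∀ i'' < i + 1, ¬ pvValid numbers (max k 1) j i'' := by
          intro i'' hi''
          by_cases hc : i'' < i
          · exact hIII i'' hc
          · have : i'' = i := by omega
            subst this
            exact hv
        have hrec := ih (i + 1) _ (by omega) hin1 (by omega) hinv' hIII'
        show (match pvAInner numbers k fuel (i + 1)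
            (if (h.get? (numbers.getD (i + 1) 0)).isNone then h.insert (numbers.getD (i + 1) 0) 1
             else h.modify (numbers.getD (i + 1) 0) 0 (· + 1)) with
          | none => ∀ i'' < numbers.length, ¬ pvValid numbers (max k 1) j i''
          | some (i', h') => i ≤ i' ∧ i' < numbers.length ∧ j ≤ i' + 1 ∧
              pvHInv h' (pvWin numbers j i') ∧ pvValid numbers (max k 1) j i' ∧
              (∀ i'' < i', ¬ pvValid numbers (max k 1) j i''))
        cases heq2 : pvAInner numbers k fuel (i + 1)
            (if (h.get? (numbers.getD (i + 1) 0)).isNone then h.insert (numbers.getD (i + 1) 0) 1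
             else h.modify (numbers.getD (i + 1) 0) 0 (· + 1)) with
        | none => rw [heq2] at hrec; exact hrec
        | some p =>
          obtain ⟨i', h'⟩ := p
          rw [heq2] at hrec
          obtain ⟨a1, a2, a3, a4, a5, a6⟩ := hrec
          exact ⟨by omega, a2, a3, a4, a5, a6⟩

theorem pvAOuter_spec (numbers : List Int) (k : Int) :
    ∀ (fuel i j : Nat) (cnt : Int) (h : PySem.Dict Int Int),
      numbers.length + 1 - j ≤ fuel → i < numbers.length → j ≤ i + 1 →
      pvHInv h (pvWin numbers j i) →
      (∀ i'' < i, ¬ pvValid numbers (max k 1) j i'') →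
      cnt = ((∑ j' ∈ Finset.range j, pvC numbers (max k 1) j' : Nat) : Int) →
      pvAOuter numbers k fuel i j cnt h =
        ((∑ j' ∈ Finset.range numbers.length, pvC numbers (max k 1) j' : Nat) : Int) := by
  intro fuel
  induction fuel with
  | zero =>
    intro i j cnt h hfuel hi hji hinv hIII hcnt
    exact absurd hfuel (by omega)
  | succ fuel ih =>
    intro i j cnt h hfuel hi hji hinv hIII hcnt
    rw [pvAOuter, if_pos hi]
    have hspec := pvAInner_spec numbers k j (numbers.length - i) i h (le_refl _) hi hji hinv hIII
    cases heq : pvAInner numbers k (numbers.length - i) i h with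
    | none =>
      rw [heq] at hspec
      have hjn : j ≤ numbers.length := by omega
      have hzero : ∀ j' ∈ Finset.Ico j numbers.length, pvC numbers (max k 1) j' = 0 := by
        intro j' hj'
        have hjj' : j ≤ j' := (Finset.mem_Ico.mp hj').1
        unfold pvC
        rw [Finset.card_eq_zero, Finset.filter_eq_empty_iff]
        intro i'' hi''
        intro hvj'
        exact hspec i'' (Finset.mem_range.mp hi'')
          (pvValid_le_j numbers (le_max_right k 1) hjj' hvj')
      rw [hcnt]
      congr 1
      rw [← Finset.sum_range_add_sum_Ico _ hjn, Finset.sum_eq_zero hzero]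
      simp
    | some p =>
      obtain ⟨i', h'⟩ := p
      rw [heq] at hspec
      obtain ⟨hii', hi'n, hji', hinv', hv', hIII'⟩ := hspec
      have hm1 : (1 : Int) ≤ max k 1 := le_max_right k 1
      have hji'' : j ≤ i' := pvValid_nonempty numbers hv' hm1
      have hjlt : j < numbers.length := by omega
      have hvalid' : pvIsValid h' k = true := by
        rw [pvIsValid_eq h' (pvWin numbers j i') k hinv']
        exact decide_eq_true hv'
      dsimp only
      rw [hvalid', if_pos rfl]
      have hC : pvC numbers (max k 1) j = numbers.length - i' := by
        unfold pvC
        have hset : (Finset.range numbers.length).filter (fun i'' => pvValid numbers (max k 1) j i'')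
            = Finset.Ico i' numbers.length := by
          ext i''
          simp only [Finset.mem_filter, Finset.mem_range, Finset.mem_Ico]
          constructor
          · rintro ⟨h1, h2⟩
            refine ⟨?_, h1⟩
            by_contra hc
            exact hIII' i'' (by omega) h2
          · rintro ⟨h1, h2⟩
            exact ⟨h2, pvValid_mono_i numbers (max k 1) hv' h1 h2⟩
        rw [hset, Nat.card_Ico]
      -- the decrement restores the invariant for left end j + 1
      obtain ⟨hval, hmem, hnd⟩ := hinv'
      have hwin : pvWin numbers j i' = (numbers.getD j 0) :: pvWin numbers (j + 1) i' :=
        pvWin_cons numbers hji'' hjlt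
      have hinv'' : pvHInv (h'.modify (numbers.getD j 0) 0 (· - 1)) (pvWin numbers (j + 1) i') := by
        refine ⟨?_, ?_, ?_⟩
        · intro z
          rw [PySem.Dict.getD_modify]
          by_cases hzy : z = (numbers.getD j 0)
          · rw [if_pos hzy, hzy, hval (numbers.getD j 0), hwin, List.count_cons_self]
            push_cast
            ring
          · rw [if_neg hzy, hval z, hwin]
            simp only [List.count_cons, beq_iff_eq]
            have : ¬ (numbers.getD j 0) = z := fun hh => hzy hh.symm
            rw [if_neg this]
            simp
        · intro z hz
          have hz' : z ∈ pvWin numbers j i' := by rw [hwin]; exact List.mem_cons_of_mem _ hz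
          rw [PySem.Dict.keys_modify h' (numbers.getD j 0) 0 (· - 1)]
          exact (PySem.Dict.mem_keys_insert _ _ _ _).mpr (Or.inr (hmem z hz'))
        · rw [PySem.Dict.keys_modify h' (numbers.getD j 0) 0 (· - 1)]
          exact PySem.Dict.nodup_keys_insert h' _ _ hnd
      have hIII'' : ∀ i'' < i', ¬ pvValid numbers (max k 1) (j + 1) i'' := by
        intro i'' hi'' hvv
        exact hIII' i'' hi'' (pvValid_anti_j numbers (max k 1) hvv hm1)
      have hcnt' : cnt + ((numbers.length : Int) - (i' : Int))
          = ((∑ j' ∈ Finset.range (j + 1), pvC numbers (max k 1) j' : Nat) : Int) := by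
        rw [Finset.sum_range_succ, hcnt, hC]
        push_cast [Nat.cast_sub (le_of_lt hi'n)]
        ring
      exact ih i' (j + 1) _ _ (by omega) hi'n (by omega) hinv'' hIII'' hcnt'

theorem pvA_char (numbers : List Int) (k : Int) (hne : numbers ≠ []) :
    duplicatePairsOnSegment numbers k =
      ((∑ j ∈ Finset.range numbers.length, pvC numbers (max k 1) j : Nat) : Int) := by
  match numbers, hne with
  | x :: rest, _ =>
    rw [duplicatePairsOnSegment]
    refine pvAOuter_spec (x :: rest) k ((x :: rest).length + 1) 0 0 0 _
      (by omega) (by simp) (by omega) ?_ (by omega) (by simp)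
    have hwin0 : pvWin (x :: rest) 0 0 = [x] := by
      unfold pvWin
      simp
    rw [hwin0]
    have hof : PySem.Dict.ofList [(x, (1 : Int))] = PySem.Dict.empty.insert x 1 := by rfl
    refine ⟨?_, ?_, ?_⟩
    · intro z
      rw [hof, PySem.Dict.getD_insert]
      by_cases hzx : z = x
      · simp [hzx]
      · rw [if_neg hzx, PySem.Dict.getD_empty]
        simp [List.count_cons, Ne.symm hzx, hzx]
    · intro z hz
      have : z = x := by simpa using hz
      rw [hof]
      exact (PySem.Dict.mem_keys_insert _ _ _ _).mpr (Or.inl this)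
    · rw [hof]
      refine PySem.Dict.nodup_keys_insert _ _ _ ?_
      rw [PySem.Dict.keys_empty]
      exact List.nodup_nil

-- half-open window numbers[a..b) (pvWinU a (b+1) = pvWin a b definitionally)
def pvWinU (numbers : List Int) (a b : Nat) : List Int := (numbers.drop a).take (b - a)

theorem pvWinU_win (numbers : List Int) (a b : Nat) :
    pvWinU numbers a (b + 1) = pvWin numbers a b := rfl

theorem pvWinU_empty (numbers : List Int) {a b : Nat} (h : b ≤ a) : pvWinU numbers a b = [] := by
  unfold pvWinU
  have : b - a = 0 := by omega
  simp [this]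

theorem pvWinU_snoc (numbers : List Int) {a r : Nat} (har : a ≤ r) (hr : r < numbers.length) :
    pvWinU numbers a (r + 1) = pvWinU numbers a r ++ [numbers.getD r 0] := by
  unfold pvWinU
  have h1 : r + 1 - a = (r - a) + 1 := by omega
  rw [h1, List.take_succ]
  congr 1
  have h2 : (numbers.drop a)[r - a]? = numbers[a + (r - a)]? := by rw [List.getElem?_drop]
  have h3 : a + (r - a) = r := by omega
  rw [h2, h3, List.getElem?_eq_getElem hr, List.getD_eq_getElem numbers 0 hr]
  simp

theorem pvWinU_cons (numbers : List Int) {a b : Nat} (hab : a < b) (ha : a < numbers.length) :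
    pvWinU numbers a b = numbers.getD a 0 :: pvWinU numbers (a + 1) b := by
  unfold pvWinU
  rw [List.drop_eq_getElem_cons ha, List.getD_eq_getElem numbers 0 ha]
  have h1 : b - a = (b - (a + 1)) + 1 := by omega
  rw [h1, List.take_succ_cons]

-- after the shrink loop: the invariant is restored, every skipped left end was valid,
-- and the final left end (if still inside the window) is invalid
theorem pvBShrink_spec (numbers : List Int) (k : Int) (r : Nat) (hr : r < numbers.length)
    (hk1 : (1 : Int) ≤ k) :
    ∀ (fuel left : Nat) (d : PySem.Dict Int Int) (pairs : Int),
      r + 1 - left ≤ fuel → left ≤ r + 1 →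
      pvHInv d (pvWinU numbers left (r + 1)) →
      pairs = (pvPairs (pvWinU numbers left (r + 1)) : Int) →
      (∀ j < left, k ≤ (pvPairs (pvWinU numbers j (r + 1)) : Int)) →
      (pvBShrink numbers k r fuel left d pairs).1 ≤ r + 1 ∧
      (∀ j < (pvBShrink numbers k r fuel left d pairs).1,
        k ≤ (pvPairs (pvWinU numbers j (r + 1)) : Int)) ∧
      ((pvBShrink numbers k r fuel left d pairs).1 ≤ r →
        ¬ (k ≤ (pvPairs (pvWinU numbers (pvBShrink numbers k r fuel left d pairs).1 (r + 1)) : Int))) ∧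
      pvHInv (pvBShrink numbers k r fuel left d pairs).2.1
        (pvWinU numbers (pvBShrink numbers k r fuel left d pairs).1 (r + 1)) ∧
      (pvBShrink numbers k r fuel left d pairs).2.2 =
        (pvPairs (pvWinU numbers (pvBShrink numbers k r fuel left d pairs).1 (r + 1)) : Int) := by
  intro fuel
  induction fuel with
  | zero =>
    intro left d pairs hfuel hle hinv hp hprev
    have hla : left = r + 1 := by omega
    subst hla
    rw [pvBShrink]
    exact ⟨le_refl _, hprev, by omega, hinv, hp⟩
  | succ fuel ih =>
    intro left d pairs hfuel hle hinv hp hprev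
    rw [pvBShrink]
    by_cases hcond : k ≤ pairs
    · rw [if_pos hcond]
      have hkp : k ≤ pairs := hcond
      have hlr : left ≤ r := by
        by_contra hc
        have hla : left = r + 1 := by omega
        subst hla
        rw [pvWinU_empty numbers (le_refl _)] at hp
        simp [pvPairs] at hp
        omega
      obtain ⟨hval, hmem, hnd⟩ := hinv
      set y := numbers.getD left 0 with hy
      have hwin : pvWinU numbers left (r + 1) = y :: pvWinU numbers (left + 1) (r + 1) :=
        pvWinU_cons numbers (by omega) (by omega)
      have hcy : d.getD y 0 = ((pvWinU numbers left (r + 1)).count y : Int) := hval y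
      have hcy' : (pvWinU numbers left (r + 1)).count y
          = (pvWinU numbers (left + 1) (r + 1)).count y + 1 := by
        rw [hwin, List.count_cons_self]
      -- new dict values
      have hval' : ∀ x : Int, (d.insert y (d.getD y 0 - 1)).getD x 0
          = ((pvWinU numbers (left + 1) (r + 1)).count x : Int) := by
        intro x
        rw [PySem.Dict.getD_insert]
        by_cases hxy : x = y
        · rw [if_pos hxy, hxy, hcy, hcy']
          push_cast
          ring
        · rw [if_neg hxy, hval x, hwin]
          simp only [List.count_cons, beq_iff_eq]
          have : ¬ y = x := fun h => hxy h.symm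
          simp [this]
      have hmem' : ∀ x ∈ pvWinU numbers (left + 1) (r + 1), x ∈ (d.insert y (d.getD y 0 - 1)).keys := by
        intro x hx
        have : x ∈ pvWinU numbers left (r + 1) := by rw [hwin]; exact List.mem_cons_of_mem _ hx
        exact (PySem.Dict.mem_keys_insert _ _ _ _).mpr (Or.inr (hmem x this))
      have hnd' : (d.insert y (d.getD y 0 - 1)).keys.Nodup := PySem.Dict.nodup_keys_insert d _ _ hnd
      have hpairs' :
          (if PySem.Int.mod (d.getD y 0) 2 == 0 then pairs - 1 else pairs)
            = (pvPairs (pvWinU numbers (left + 1) (r + 1)) : Int) := by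
        have hrec : pvPairs (pvWinU numbers left (r + 1))
            = pvPairs (pvWinU numbers (left + 1) (r + 1)) +
              (if ((pvWinU numbers (left + 1) (r + 1)).count y + 1) % 2 = 0 then 1 else 0) := by
          rw [hwin]; rfl
        have hC : d.getD y 0 = (((pvWinU numbers (left + 1) (r + 1)).count y + 1 : Nat) : Int) := by
          rw [hcy, hcy']
        rw [hC, show (2:Int) = ((2:Nat):Int) from rfl, PySem.Int.mod_natCast, hp, hrec]
        by_cases hpar : ((pvWinU numbers (left + 1) (r + 1)).count y + 1) % 2 = 0
        · simp only [hpar, Nat.cast_zero, if_pos]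
          simp
        · have h1 : ((pvWinU numbers (left + 1) (r + 1)).count y + 1) % 2 = 1 := by omega
          simp only [h1, Nat.cast_one, hpar, if_false]
          norm_num
      have hprev' : ∀ j < left + 1, k ≤ (pvPairs (pvWinU numbers j (r + 1)) : Int) := by
        intro j hj
        by_cases hjl : j < left
        · exact hprev j hjl
        · have : j = left := by omega
          subst this
          rw [← hp]; exact hkp
      have := ih (left + 1) (d.insert y (d.getD y 0 - 1))
        (if PySem.Int.mod (d.getD y 0) 2 == 0 then pairs - 1 else pairs)
        (by omega) (by omega) ⟨hval', hmem', hnd'⟩ hpairs' hprev'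
      exact ⟨this.1, this.2.1, this.2.2.1, this.2.2.2.1, this.2.2.2.2⟩
    · rw [if_neg hcond]
      refine ⟨hle, hprev, ?_, hinv, hp⟩
      intro _ hk
      exact hcond (by rw [hp]; exact hk)

theorem pvBGo_spec (numbers : List Int) (k : Int) (hk1 : (1 : Int) ≤ k) :
    ∀ (rem : List Int) (r left : Nat) (d : PySem.Dict Int Int) (pairs total : Int),
      rem = numbers.drop r → r ≤ numbers.length → left ≤ r →
      pvHInv d (pvWinU numbers left r) →
      pairs = (pvPairs (pvWinU numbers left r) : Int) →
      (∀ j < left, k ≤ (pvPairs (pvWinU numbers j r) : Int)) →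
      total = ((∑ r' ∈ Finset.range r, pvGcnt numbers k r' : Nat) : Int) →
      pvBGo numbers k rem r left d pairs total =
        ((∑ i ∈ Finset.range numbers.length, pvGcnt numbers k i : Nat) : Int) := by
  intro rem
  induction rem with
  | nil =>
    intro r left d pairs total hrem hr hle hinv hp hprev htot
    have : r = numbers.length := by
      have := congrArg List.length hrem
      simp at this
      omega
    rw [pvBGo, htot, this]
  | cons x rest ih =>
    intro r left d pairs total hrem hr hle hinv hp hprev htot
    have hrn : r < numbers.length := by
      by_contra hc
      rw [List.drop_eq_nil_of_le (by omega)] at hrem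
      simp at hrem
    have hcons : x :: rest = numbers[r] :: numbers.drop (r + 1) := by
      rw [hrem, List.drop_eq_getElem_cons hrn]
    have hx : x = numbers.getD r 0 := by
      rw [List.getD_eq_getElem numbers 0 hrn]
      exact (List.cons_eq_cons.mp hcons).1
    have hrest : rest = numbers.drop (r + 1) := (List.cons_eq_cons.mp hcons).2
    rw [pvBGo]
    obtain ⟨hval, hmem, hnd⟩ := hinv
    -- the grown window
    have hwin : pvWinU numbers left (r + 1) = pvWinU numbers left r ++ [numbers.getD r 0] :=
      pvWinU_snoc numbers hle hrn
    have hc : d.getD x 0 + 1 = (((pvWinU numbers left r).count x + 1 : Nat) : Int) := by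
      rw [hval x]; push_cast; ring
    have hcount : (pvWinU numbers left (r + 1)).count x = (pvWinU numbers left r).count x + 1 := by
      rw [hwin, ← hx, List.count_append]
      simp
    have hval' : ∀ z : Int, (d.insert x (d.getD x 0 + 1)).getD z 0
        = ((pvWinU numbers left (r + 1)).count z : Int) := by
      intro z
      rw [PySem.Dict.getD_insert]
      by_cases hzx : z = x
      · rw [if_pos hzx, hzx, hc, hcount]
      · rw [if_neg hzx, hval z, hwin, ← hx, List.count_append]
        simp [List.count_cons, Ne.symm hzx]  -- count z [x] = 0
    have hmem' : ∀ z ∈ pvWinU numbers left (r + 1), z ∈ (d.insert x (d.getD x 0 + 1)).keys := by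
      intro z hz
      rw [hwin, ← hx] at hz
      rcases List.mem_append.mp hz with hz1 | hz2
      · exact (PySem.Dict.mem_keys_insert _ _ _ _).mpr (Or.inr (hmem z hz1))
      · have : z = x := by simpa using hz2
        exact (PySem.Dict.mem_keys_insert _ _ _ _).mpr (Or.inl this)
    have hnd' : (d.insert x (d.getD x 0 + 1)).keys.Nodup := PySem.Dict.nodup_keys_insert d _ _ hnd
    have hsnocpair : pvPairs (pvWinU numbers left (r + 1))
        = pvPairs (pvWinU numbers left r) +
          (if ((pvWinU numbers left r).count x + 1) % 2 = 0 then 1 else 0) := by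
      rw [hwin, ← hx, pvPairs_snoc]
      rfl
    have hpairs' : (if PySem.Int.mod (d.getD x 0 + 1) 2 == 0 then pairs + 1 else pairs)
        = (pvPairs (pvWinU numbers left (r + 1)) : Int) := by
      rw [hc, show (2:Int) = ((2:Nat):Int) from rfl, PySem.Int.mod_natCast, hp, hsnocpair]
      by_cases hpar : ((pvWinU numbers left r).count x + 1) % 2 = 0
      · simp only [hpar, Nat.cast_zero, if_pos]
        simp
      · have h1 : ((pvWinU numbers left r).count x + 1) % 2 = 1 := by omega
        simp only [h1, Nat.cast_one, hpar, if_false]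
        norm_num
    have hprev' : ∀ j < left, k ≤ (pvPairs (pvWinU numbers j (r + 1)) : Int) := by
      intro j hj
      have h1 := hprev j hj
      have hjr : j ≤ r := by omega
      have hsn : pvPairs (pvWinU numbers j r) ≤ pvPairs (pvWinU numbers j (r + 1)) := by
        rw [pvWinU_snoc numbers hjr hrn, pvPairs_snoc]
        exact pvPairs_le_cons _ _
      omega
    have hshr := pvBShrink_spec numbers k r hrn hk1 (r + 1 - left) left
      (d.insert x (d.getD x 0 + 1))
      (if PySem.Int.mod (d.getD x 0 + 1) 2 == 0 then pairs + 1 else pairs)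
      (le_refl _) (by omega) ⟨hval', hmem', hnd'⟩ hpairs' hprev'
    set out := pvBShrink numbers k r (r + 1 - left)  left
      (d.insert x (d.getD x 0 + 1))
      (if PySem.Int.mod (d.getD x 0 + 1) 2 == 0 then pairs + 1 else pairs) with hout
    obtain ⟨ho1, ho2, ho3, ho4, ho5⟩ := hshr
    -- the count of valid left ends for right end r is exactly out.1
    have hG : pvGcnt numbers k r = out.1 := by
      unfold pvGcnt
      have hsub : (Finset.range numbers.length).filter
          (fun j => j ≤ r ∧ pvValid numbers k j r) = Finset.range out.1 := by
        ext j
        simp only [Finset.mem_filter, Finset.mem_range]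
        constructor
        · rintro ⟨hjn, hjr, hvj⟩
          by_contra hc
          push_neg at hc
          -- out.1 ≤ j ≤ r, valid at j, anti-monotone down to out.1 contradicts ho3
          have hanti : ∀ t : Nat, t ≤ j - out.1 →
              k ≤ (pvPairs (pvWin numbers (j - t) r) : Int) := by
            intro t
            induction t with
            | zero =>
              intro _
              simpa [pvValid] using hvj
            | succ t iht =>
              intro hts
              have h1 := iht (by omega)
              have hjt : j - (t + 1) ≤ r := by omega
              have hjtn : j - (t + 1) < numbers.length := by omega
              have hstep : pvPairs (pvWin numbers (j - t) r)
                  ≤ pvPairs (pvWin numbers (j - (t + 1)) r) := by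
                have hidx : j - t = (j - (t + 1)) + 1 := by omega
                rw [hidx, pvWin_cons numbers hjt hjtn]
                exact pvPairs_le_cons _ _
              omega
          have := hanti (j - out.1) (le_refl _)
          have hidx : j - (j - out.1) = out.1 := by omega
          rw [hidx] at this
          exact ho3 (by omega) (by rw [pvWinU_win]; exact this)
        · intro hj
          have h1 := ho2 j hj
          rw [pvWinU_win] at h1
          refine ⟨by omega, by omega, h1⟩
      rw [hsub, Finset.card_range]
    have htot' : total + (out.1 : Int)
        = ((∑ r' ∈ Finset.range (r + 1), pvGcnt numbers k r' : Nat) : Int) := by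
      rw [Finset.sum_range_succ, htot, hG]
      push_cast; ring
    exact ih (r + 1) out.1 out.2.1 out.2.2 (total + (out.1 : Int)) hrest (by omega) ho1 ho4 ho5
      (fun j hj => ho2 j hj) htot'

theorem pvB_char (numbers : List Int) (k : Int) :
    duplicatePairsOnSegment_alt numbers k =
      ((∑ i ∈ Finset.range numbers.length, pvGcnt numbers (max k 1) i : Nat) : Int) := by
  unfold duplicatePairsOnSegment_alt
  refine pvBGo_spec numbers (max k 1) (le_max_right k 1) numbers 0 0 PySem.Dict.empty 0 0
    (by simp) (by omega) (le_refl _)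
    ⟨?_, ?_, ?_⟩ ?_ (by omega) (by simp)
  · intro x
    rw [pvWinU_empty numbers (le_refl 0)]
    simp [PySem.Dict.getD_empty]
  · intro x hx
    rw [pvWinU_empty numbers (le_refl 0)] at hx
    simp at hx
  · simp [PySem.Dict.keys_empty]  -- placeholder name; fixed below if needed
  · rw [pvWinU_empty numbers (le_refl 0)]
    rfl

-- ===== VERDICT (by name: the statement is the Claim_ definition above) =====
theorem duplicatePairsOnSegment_spec : Claim_equal_duplicatePairsOnSegment := by
  intro numbers k _ hpre
  unfold Spec_duplicatePairsOnSegment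
  have hm1 : (1 : Int) ≤ max k 1 := le_max_right k 1
  rw [pvA_char numbers k hpre, pvB_char numbers k]
  congr 1
  calc ∑ j ∈ Finset.range numbers.length, pvC numbers (max k 1) j
      = ∑ j ∈ Finset.range numbers.length, ∑ i ∈ Finset.range numbers.length,
          if pvValid numbers (max k 1) j i then 1 else 0 := by
        refine Finset.sum_congr rfl (fun j _ => ?_)
        unfold pvC
        rw [Finset.card_filter]
    _ = ∑ j ∈ Finset.range numbers.length, ∑ i ∈ Finset.range numbers.length,
          if j ≤ i ∧ pvValid numbers (max k 1) j i then 1 else 0 := by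
        refine Finset.sum_congr rfl (fun j _ => Finset.sum_congr rfl (fun i _ => ?_))
        by_cases hv : pvValid numbers (max k 1) j i
        · have hji : j ≤ i := pvValid_nonempty numbers hv hm1
          simp [hv, hji]
        · simp [hv]
    _ = ∑ i ∈ Finset.range numbers.length, ∑ j ∈ Finset.range numbers.length,
          if j ≤ i ∧ pvValid numbers (max k 1) j i then 1 else 0 := Finset.sum_comm
    _ = ∑ i ∈ Finset.range numbers.length, pvGcnt numbers (max k 1) i := by
        refine Finset.sum_congr rfl (fun i _ => ?_)
        unfold pvGcnt
        rw [Finset.card_filter]
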